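-- pv_equiv track=rewrite | github.com/mikuna-xe/AoC_2019 | Day8.py | get_pixel
-- ===== SOURCE A (Python) =====
-- def get_pixel(pos, layers, level):
--     if layers[level][pos] == 2:
--         return get_pixel(pos, layers, level+1)
--     else:
--         if layers[level][pos] == 1:
--             return '#'
--         else:
--             return ' '
-- ===== SOURCE B (Python) =====
-- def get_pixel(pos, layers, level):
--     lv = next(l for l in range(level, len(layers)) if layers[l][pos] != 2)
--     return '#' if layers[lv][pos] == 1 else ' '
-- ===== Notes on version B (the rewrite author's own statement) =====
-- stated objective: alternative
-- what changed: A's recursion through layers is replaced by a search over the explicit list of candidate levels range(level, len(layers)): next() picks the first level whose pixel is not transparent, which is then classified; no recursion and no mutable loop state.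
import Mathlib
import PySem

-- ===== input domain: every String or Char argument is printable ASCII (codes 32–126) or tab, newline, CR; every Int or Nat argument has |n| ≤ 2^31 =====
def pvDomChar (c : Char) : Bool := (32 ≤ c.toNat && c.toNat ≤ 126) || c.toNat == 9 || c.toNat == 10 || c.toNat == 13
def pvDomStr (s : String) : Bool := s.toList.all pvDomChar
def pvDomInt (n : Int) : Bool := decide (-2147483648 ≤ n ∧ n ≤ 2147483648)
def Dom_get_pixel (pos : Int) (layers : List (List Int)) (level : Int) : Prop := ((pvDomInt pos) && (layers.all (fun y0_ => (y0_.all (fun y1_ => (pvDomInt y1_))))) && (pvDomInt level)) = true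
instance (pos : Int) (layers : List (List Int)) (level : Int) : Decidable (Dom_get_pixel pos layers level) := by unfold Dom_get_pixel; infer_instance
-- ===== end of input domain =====

-- B replaces A's recursion by a search over the explicit candidate-level list range(level, len(layers)); equal on Pre_ (return value only).

-- layers[level][pos] as Python computes it (negative indices wrap, out of range = IndexError = none)
def pvGet2 (layers : List (List Int)) (level pos : Int) : Option Int :=
  (PySem.List.pyGet? layers level).bind (fun row => PySem.List.pyGet? row pos)

-- ===== PORT A =====
-- A's recursion; fuel bounds the depth (once level leaves the list pvGet2 is none = IndexError,
-- so under Pre_ the fuel is never exhausted; "" marks the raising cases, which Pre_ excludes).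
def getPixelRec (layers : List (List Int)) (pos : Int) : Nat → Int → String
  | 0, _ => ""
  | fuel+1, level =>
    match pvGet2 layers level pos with
    | none => ""
    | some v =>
      if v = 2 then getPixelRec layers pos fuel (level+1)
      else if v = 1 then "#" else " "

def get_pixel (pos : Int) (layers : List (List Int)) (level : Int) : String :=
  getPixelRec layers pos (2 * layers.length + 1) level

-- ===== PORT B =====
-- next(l for l in range(level, len(layers)) if layers[l][pos] != 2): find? over the range list;
-- none = StopIteration, and a found level whose pixel is unreadable = IndexError in the generator
-- ("" marks both raising cases, which Pre_ excludes).
def get_pixel_alt (pos : Int) (layers : List (List Int)) (level : Int) : String :=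
  match (PySem.List.pyRange level (layers.length : Int) 1).find?
      (fun l => pvGet2 layers l pos != some 2) with
  | none => ""
  | some lv =>
    match pvGet2 layers lv pos with
    | none => ""
    | some v => if v = 1 then "#" else " "

-- ===== PRECONDITION & SPEC =====
-- Pre_ excludes exactly the inputs on which the Python A raises (IndexError when level or pos
-- leaves the list, i.e. every pixel from `level` on is transparent or unreadable): some layer
-- k steps down has a readable, non-transparent pixel at pos, all pixels before it being 2.
def Pre_get_pixel (pos : Int) (layers : List (List Int)) (level : Int) : Prop :=
  ∃ k ∈ List.range (2 * layers.length + 1),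
    (∀ j < k, pvGet2 layers (level + j) pos = some 2) ∧
    pvGet2 layers (level + k) pos ≠ none ∧
    pvGet2 layers (level + k) pos ≠ some 2
instance (pos : Int) (layers : List (List Int)) (level : Int) : Decidable (Pre_get_pixel pos layers level) := by unfold Pre_get_pixel; infer_instance

def pvWitness_get_pixel : Int × List (List Int) × Int := (0, [[2, 0], [1, 1]], 0)

def Spec_get_pixel (pos : Int) (layers : List (List Int)) (level : Int) (out : String) : Prop := out = get_pixel_alt pos layers level
instance (pos : Int) (layers : List (List Int)) (level : Int) (out : String) : Decidable (Spec_get_pixel pos layers level out) := by unfold Spec_get_pixel; infer_instance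

-- ===== CLAIM (what is proved, stated in full; the proofs are below) =====
def Claim_equal_get_pixel : Prop := ∀ (pos : Int) (layers : List (List Int)) (level : Int), Dom_get_pixel pos layers level → Pre_get_pixel pos layers level → Spec_get_pixel pos layers level (get_pixel pos layers level)

-- ===== LEMMAS AND PROOFS =====

-- A's recursion: with k transparent pixels and then a readable non-transparent one,
-- the recursion classifies that pixel.
lemma a_eval (layers : List (List Int)) (pos : Int) :
    ∀ (k fuel : Nat) (level v : Int), k < fuel →
    (∀ j < k, pvGet2 layers (level + j) pos = some 2) →
    pvGet2 layers (level + k) pos = some v → v ≠ 2 →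
    getPixelRec layers pos fuel level = (if v = 1 then "#" else " ") := by
  intro k
  induction k with
  | zero =>
    intro fuel level v hk h2 hv hne
    cases fuel with
    | zero => omega
    | succ f =>
      have hv0 : pvGet2 layers level pos = some v := by simpa using hv
      simp [getPixelRec, hv0, hne]
  | succ k ih =>
    intro fuel level v hk h2 hv hne
    cases fuel with
    | zero => omega
    | succ f =>
      have h0 : pvGet2 layers level pos = some 2 := by
        have := h2 0 (Nat.succ_pos k); simpa using this
      have h2' : ∀ j < k, pvGet2 layers (level + 1 + j) pos = some 2 := by
        intro j hj
        have := h2 (j + 1) (by omega)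
        have harith : level + ((j : Int) + 1) = level + 1 + j := by ring
        simpa [harith] using this
      have hv' : pvGet2 layers (level + 1 + k) pos = some v := by
        have harith : level + ((k : Int) + 1) = level + 1 + k := by ring
        simpa [harith] using hv
      have := ih f (level + 1) v (by omega) h2' hv' hne
      simpa [getPixelRec, h0] using this

-- B's search: find? over the range list stops exactly at level + k.
lemma b_find (layers : List (List Int)) (pos : Int) :
    ∀ (k : Nat) (level : Int), level + k < (layers.length : Int) →
    (∀ j < k, pvGet2 layers (level + j) pos = some 2) →
    pvGet2 layers (level + k) pos ≠ some 2 →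
    (PySem.List.pyRange level (layers.length : Int) 1).find?
      (fun l => pvGet2 layers l pos != some 2) = some (level + k) := by
  intro k
  induction k with
  | zero =>
    intro level hlt h2 hne
    have hlt' : level < (layers.length : Int) := by simpa using hlt
    rw [PySem.List.pyRange_one_cons hlt']
    have hne0 : pvGet2 layers level pos ≠ some 2 := by simpa using hne
    have : (pvGet2 layers level pos != some 2) = true := by simpa using hne0
    simp [this]
  | succ k ih =>
    intro level hlt h2 hne
    have hlt' : level < (layers.length : Int) := by omega
    rw [PySem.List.pyRange_one_cons hlt']
    have h0 : pvGet2 layers level pos = some 2 := by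
      have := h2 0 (Nat.succ_pos k); simpa using this
    have hp : (pvGet2 layers level pos != some 2) = false := by simp [h0]
    have h2' : ∀ j < k, pvGet2 layers (level + 1 + j) pos = some 2 := by
      intro j hj
      have := h2 (j + 1) (by omega)
      have harith : level + ((j : Int) + 1) = level + 1 + j := by ring
      simpa [harith] using this
    have harith : level + ((k : Int) + 1) = level + 1 + k := by ring
    have hne' : pvGet2 layers (level + 1 + k) pos ≠ some 2 := by
      simpa [harith] using hne
    have hrec := ih (level + 1) (by omega) h2' hne'
    simp only [List.find?_cons, hp, hrec]
    congr 1
    push_cast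
    ring

-- a readable pixel pins level + k inside the list, so B's range reaches it
lemma inrange_of_get (layers : List (List Int)) (pos i : Int)
    (h : pvGet2 layers i pos ≠ none) : i < (layers.length : Int) := by
  unfold pvGet2 at h
  by_contra hge
  have hnone : PySem.List.pyGet? layers i = none := by
    rw [PySem.List.pyGet?_eq_none_iff]
    unfold PySem.Raise.InRange
    omega
  simp [hnone] at h

-- ===== VERDICT (by name: the statement is the Claim_ definition above) =====
theorem get_pixel_spec : Claim_equal_get_pixel := by
  intro pos layers level _ hpre
  obtain ⟨k, hkmem, h2, hnn, hn2⟩ := hpre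
  have hk : k < 2 * layers.length + 1 := List.mem_range.mp hkmem
  obtain ⟨v, hv⟩ : ∃ v, pvGet2 layers (level + k) pos = some v := by
    cases h : pvGet2 layers (level + k) pos with
    | none => exact absurd h hnn
    | some v => exact ⟨v, rfl⟩
  have hne : v ≠ 2 := by rintro rfl; exact hn2 hv
  have hlt : level + k < (layers.length : Int) := inrange_of_get layers pos _ hnn
  have hA := a_eval layers pos k (2 * layers.length + 1) level v hk h2 hv hne
  have hB := b_find layers pos k level hlt h2 hn2
  show get_pixel pos layers level = get_pixel_alt pos layers level
  simp only [get_pixel, get_pixel_alt, hA, hB, hv]
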